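-- pv_equiv track=rewrite | github.com/vitcra/problems | coursera/stringalgs/week2/suffix_array/suffix_array.py | guess_lms_sort
-- ===== SOURCE A (Python) =====
-- STYPE = ord('S')
--
-- LTYPE = ord('L')
--
-- def is_lms_char(offset, typemap):
--   if offset == 0:
--     return False
--
--   if typemap[offset] == STYPE and typemap[offset-1] == LTYPE:
--     return True
--
--   return False
--
-- def find_bucket_tails(bucketSizes):
--   offset = 1
--   tails = []
--   for size in bucketSizes:
--     offset += size
--     tails.append(offset-1)
--
--   return tails
--
-- def guess_lms_sort(text, bucketSizes, typemap):
--   L = len(text)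
--   guessedSuffixArray = [-1] * (L + 1)
--   bucketTails = find_bucket_tails(bucketSizes)
--
--   for i in range(L):
--     if not is_lms_char(i, typemap):
--       continue
--
--     char = text[i]
--     guessedSuffixArray[bucketTails[char]] = i
--     bucketTails[char] -= 1
--
--   guessedSuffixArray[0] = L
--   return guessedSuffixArray
-- ===== SOURCE B (Python) =====
-- STYPE = ord('S')
--
-- LTYPE = ord('L')
--
-- def guess_lms_sort(text, bucketSizes, typemap):
--     L = len(text)
--     out = [-1] * (L + 1)
--     # Phase 1: index the LMS positions, grouped by their leading character.
--     groups = [[] for _ in bucketSizes]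
--     for i in range(1, L):
--         if typemap[i] == STYPE and typemap[i - 1] == LTYPE:
--             groups[text[i]].append(i)
--     # Phase 2: walk the buckets; fill each bucket from its tail downward.
--     tail = 0
--     for size, positions in zip(bucketSizes, groups):
--         tail += size
--         for k, p in enumerate(positions):
--             out[tail - k] = p
--     out[0] = L
--     return out
-- ===== Notes on version B (the rewrite author's own statement) =====
-- stated objective: alternative
-- what changed: A does one flat left-to-right scan placing each LMS suffix while decrementing a mutable bucket-tail array; B first builds an index of LMS positions grouped by leading character in one pass, then fills each bucket's tail slots downward in a second per-bucket sweep.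
import Mathlib
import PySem

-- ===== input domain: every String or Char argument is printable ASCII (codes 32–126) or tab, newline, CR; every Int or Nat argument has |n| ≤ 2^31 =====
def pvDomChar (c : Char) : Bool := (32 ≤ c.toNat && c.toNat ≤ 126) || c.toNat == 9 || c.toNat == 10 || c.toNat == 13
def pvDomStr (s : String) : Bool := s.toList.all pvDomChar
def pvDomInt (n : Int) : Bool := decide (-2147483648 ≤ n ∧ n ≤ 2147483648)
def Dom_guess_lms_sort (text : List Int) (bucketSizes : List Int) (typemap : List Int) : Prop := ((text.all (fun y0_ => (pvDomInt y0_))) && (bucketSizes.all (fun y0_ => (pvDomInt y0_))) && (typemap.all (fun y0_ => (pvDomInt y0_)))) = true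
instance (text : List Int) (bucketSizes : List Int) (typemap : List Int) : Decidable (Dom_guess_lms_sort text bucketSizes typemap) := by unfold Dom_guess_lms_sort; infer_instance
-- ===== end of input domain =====

-- B replaces A's single flat placement scan (mutable bucket-tail array) by a two-phase build:
-- first index the LMS positions grouped by leading character, then fill each bucket's tail slots
-- downward in one sweep per bucket (objective: alternative decomposition, same cost).
-- Pre_ excludes inputs on which A raises (typemap shorter than the text, an LMS leading character
-- outside the bucket range, a placement slot outside the array) and inputs whose placement slots
-- collide via negative-index wraparound or overfull buckets, where the final array depends on the
-- accidental order of the writes.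

-- ===== PORT A =====
def STYPE : Int := 83

def LTYPE : Int := 76

def is_lms_char (offset : Int) (typemap : List Int) : Bool :=
  if offset == 0 then false
  else if PySem.List.pyGetD typemap offset 0 == STYPE && PySem.List.pyGetD typemap (offset - 1) 0 == LTYPE then true
  else false

def find_bucket_tails (bucketSizes : List Int) : List Int :=
  (bucketSizes.foldl (fun (st : Int × List Int) size => (st.1 + size, st.2 ++ [st.1 + size - 1])) (1, ([] : List Int))).2

def pvStepA (text : List Int) (typemap : List Int) (st : List Int × List Int) (i : Int) : List Int × List Int :=
  if is_lms_char i typemap then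
    let char := PySem.List.pyGetD text i 0
    let slot := PySem.List.pyGetD st.2 char 0
    (PySem.List.pySetD st.1 slot i, PySem.List.pySetD st.2 char (slot - 1))
  else st

def guess_lms_sort (text : List Int) (bucketSizes : List Int) (typemap : List Int) : List Int :=
  let L : Int := (text.length : Int)
  let res := (PySem.List.pyRange 0 L 1).foldl (pvStepA text typemap)
      (List.replicate (text.length + 1) (-1), find_bucket_tails bucketSizes)
  PySem.List.pySetD res.1 0 L

-- ===== PORT B =====
def pvStepB1 (text : List Int) (typemap : List Int) (gs : List (List Int)) (i : Int) : List (List Int) :=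
  if PySem.List.pyGetD typemap i 0 == STYPE && PySem.List.pyGetD typemap (i - 1) 0 == LTYPE then
    PySem.List.pySetD gs (PySem.List.pyGetD text i 0)
      (PySem.List.pyGetD gs (PySem.List.pyGetD text i 0) [] ++ [i])
  else gs

def pvStepB2 (st : Int × List Int) (p : Int × List Int) : Int × List Int :=
  let tail := st.1 + p.1
  (tail, (PySem.List.enumerate p.2).foldl (fun o kp => PySem.List.pySetD o (tail - kp.1) kp.2) st.2)

def guess_lms_sort_alt (text : List Int) (bucketSizes : List Int) (typemap : List Int) : List Int :=
  let L : Int := (text.length : Int)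
  let groups := (PySem.List.pyRange 1 L 1).foldl (pvStepB1 text typemap)
      (List.replicate bucketSizes.length [])
  let res := (bucketSizes.zip groups).foldl pvStepB2 (0, List.replicate (text.length + 1) (-1))
  PySem.List.pySetD res.2 0 L

-- ===== PRECONDITION & SPEC =====
-- closed-form helpers describing, from the input alone, the LMS positions and the slot each one targets
def pvLms (typemap : List Int) (i : Nat) : Bool :=
  decide (0 < i) && (typemap.getD i 0 == 83) && (typemap.getD (i - 1) 0 == 76)

def pvPos (text : List Int) (typemap : List Int) : List Nat :=
  (List.range text.length).filter (pvLms typemap)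

def pvCnt (text : List Int) (typemap : List Int) (n : Nat) (c : Int) : Nat :=
  ((List.range n).filter (pvLms typemap)).countP (fun j => text.getD j 0 == c)

def pvTail (bucketSizes : List Int) (c : Nat) : Int := (bucketSizes.take (c + 1)).sum

def pvSlot (text : List Int) (bucketSizes : List Int) (typemap : List Int) (i : Nat) : Int :=
  pvTail bucketSizes (text.getD i 0).toNat - (pvCnt text typemap i (text.getD i 0) : Int)

-- Pre_ excludes inputs where A raises, and wraparound/overfull-bucket inputs whose result depends
-- on the accidental order of the placement writes (slots must be distinct and inside 1..len(text)).
def Pre_guess_lms_sort (text : List Int) (bucketSizes : List Int) (typemap : List Int) : Prop :=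
  (2 ≤ text.length → text.length ≤ typemap.length) ∧
  (∀ i ∈ pvPos text typemap,
      0 ≤ text.getD i 0 ∧ text.getD i 0 < (bucketSizes.length : Int) ∧
      1 ≤ pvSlot text bucketSizes typemap i ∧ pvSlot text bucketSizes typemap i ≤ (text.length : Int)) ∧
  ((pvPos text typemap).map (pvSlot text bucketSizes typemap)).Pairwise (· ≠ ·)

instance (text : List Int) (bucketSizes : List Int) (typemap : List Int) : Decidable (Pre_guess_lms_sort text bucketSizes typemap) := by unfold Pre_guess_lms_sort; infer_instance

def pvWitness_guess_lms_sort : List Int × List Int × List Int := ([0, 1], [1, 1], [76, 83])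

def Spec_guess_lms_sort (text : List Int) (bucketSizes : List Int) (typemap : List Int) (out : List Int) : Prop := out = guess_lms_sort_alt text bucketSizes typemap
instance (text : List Int) (bucketSizes : List Int) (typemap : List Int) (out : List Int) : Decidable (Spec_guess_lms_sort text bucketSizes typemap out) := by unfold Spec_guess_lms_sort; infer_instance

-- ===== CLAIM (what is proved, stated in full; the proofs are below) =====
def Claim_equal_guess_lms_sort : Prop := ∀ (text : List Int) (bucketSizes : List Int) (typemap : List Int), Dom_guess_lms_sort text bucketSizes typemap → Pre_guess_lms_sort text bucketSizes typemap → Spec_guess_lms_sort text bucketSizes typemap (guess_lms_sort text bucketSizes typemap)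

-- ===== LEMMAS AND PROOFS =====

-- proof-side helpers: a write list applied Python-style
def pvApply (g : List Int) (ws : List (Int × Int)) : List Int :=
  ws.foldl (fun g w => PySem.List.pySetD g w.1 w.2) g

def pvWrites (text : List Int) (bucketSizes : List Int) (typemap : List Int) (n : Nat) : List (Int × Int) :=
  ((List.range n).filter (pvLms typemap)).map (fun i => (pvSlot text bucketSizes typemap i, (i : Int)))

def pvBucket (text : List Int) (typemap : List Int) (c : Nat) : List Nat :=
  (pvPos text typemap).filter (fun j => text.getD j 0 == (c : Int))

theorem pv_lms_bridge (typemap : List Int) (n : Nat) :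
    is_lms_char (n : Int) typemap = pvLms typemap n := by
  unfold is_lms_char pvLms STYPE LTYPE
  cases n with
  | zero => simp
  | succ m =>
    have h1 : ¬ (((m + 1 : Nat) : Int) = 0) := by omega
    have h2 : ((m + 1 : Nat) : Int) - 1 = ((m : Nat) : Int) := by push_cast; ring
    simp only [beq_iff_eq, h1, if_false, h2, PySem.List.pyGetD_natCast]
    simp only [List.getD, Nat.add_sub_cancel]
    by_cases hb : (typemap[m + 1]?.getD 0 == 83 && typemap[m]?.getD 0 == 76) = true <;>
      simp [hb]


theorem pv_tails_aux : ∀ (bs : List Int) (o : Int) (acc : List Int),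
    (bs.foldl (fun (st : Int × List Int) size => (st.1 + size, st.2 ++ [st.1 + size - 1])) (o, acc)).2
      = acc ++ (List.range bs.length).map (fun c => o + (bs.take (c + 1)).sum - 1) := by
  intro bs
  induction bs with
  | nil => simp
  | cons s bs ih =>
    intro o acc
    simp only [List.foldl_cons, ih, List.length_cons, List.range_succ_eq_map, List.map_cons,
      List.map_map]
    simp only [List.take_succ_cons, List.sum_cons, List.append_assoc, List.singleton_append]
    congr 1
    congr 1
    · simp
    apply List.map_congr_left
    intro c _
    simp only [Function.comp_apply]
    ring

theorem pv_tails_eq (bucketSizes : List Int) :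
    find_bucket_tails bucketSizes =
      (List.range bucketSizes.length).map (fun c => pvTail bucketSizes c) := by
  unfold find_bucket_tails pvTail
  rw [pv_tails_aux]
  simp

theorem pv_set_map_range {α : Type} (C : Nat) (f : Nat → α) (k : Nat) (v : α) :
    ((List.range C).map f).set k v =
      (List.range C).map (fun c => if c = k then v else f c) := by
  apply List.ext_getElem
  · simp
  · intro i h1 h2
    simp only [List.getElem_set, List.getElem_map, List.getElem_range]
    by_cases h : i = k
    · simp [h]
    · simp [h, Ne.symm h]

theorem pv_cnt_succ (text typemap : List Int) (n : Nat) (c : Int) :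
    pvCnt text typemap (n + 1) c = pvCnt text typemap n c +
      (if pvLms typemap n && (text.getD n 0 == c) then 1 else 0) := by
  unfold pvCnt
  rw [List.range_succ, List.filter_append, List.countP_append]
  by_cases h : pvLms typemap n
  · by_cases h2 : (text.getD n 0 == c) = true <;> simp [h]
  · simp [h]

theorem pv_writes_succ (text bucketSizes typemap : List Int) (n : Nat) :
    pvWrites text bucketSizes typemap (n + 1) = pvWrites text bucketSizes typemap n ++
      (if pvLms typemap n then [(pvSlot text bucketSizes typemap n, (n : Int))] else []) := by
  unfold pvWrites
  rw [List.range_succ, List.filter_append, List.map_append]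
  by_cases h : pvLms typemap n <;> simp [h]

theorem pv_apply_append (g : List Int) (ws : List (Int × Int)) (w : Int × Int) :
    pvApply g (ws ++ [w]) = PySem.List.pySetD (pvApply g ws) w.1 w.2 := by
  simp [pvApply]

theorem pv_A_loop (text bucketSizes typemap : List Int)
    (hP : ∀ i ∈ pvPos text typemap,
      0 ≤ text.getD i 0 ∧ text.getD i 0 < (bucketSizes.length : Int)) :
    ∀ n, n ≤ text.length →
      (PySem.List.pyRange 0 (n : Int) 1).foldl (pvStepA text typemap)
          (List.replicate (text.length + 1) (-1), find_bucket_tails bucketSizes) =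
        (pvApply (List.replicate (text.length + 1) (-1)) (pvWrites text bucketSizes typemap n),
         (List.range bucketSizes.length).map
           (fun c => pvTail bucketSizes c - (pvCnt text typemap n (c : Int) : Int))) := by
  intro n
  induction n with
  | zero =>
    intro _
    rw [show ((0 : Nat) : Int) = 0 from rfl, PySem.List.pyRange_one_eq_nil (by omega)]
    simp [pvWrites, pvApply, pvCnt, pv_tails_eq]
  | succ n ih =>
    intro hn
    have hn' : n ≤ text.length := by omega
    have hsplit : PySem.List.pyRange 0 ((n + 1 : Nat) : Int) 1
        = PySem.List.pyRange 0 (n : Int) 1 ++ [(n : Int)] := by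
      rw [show ((n + 1 : Nat) : Int) = (n : Int) + 1 from by push_cast; ring,
        PySem.List.pyRange_one_succ_right (by omega)]
    rw [hsplit, List.foldl_append, ih hn']
    simp only [List.foldl_cons, List.foldl_nil]
    unfold pvStepA
    rw [pv_lms_bridge]
    by_cases hl : pvLms typemap n
    · have hmem : n ∈ pvPos text typemap := by
        unfold pvPos
        rw [List.mem_filter, List.mem_range]
        exact ⟨hn, hl⟩  -- hn : n+1 ≤ len → n < len? need n < text.length
      obtain ⟨hc0, hcC⟩ := hP n hmem
      have htn : (text.getD n 0).toNat < bucketSizes.length := by omega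
      have hcast : ((text.getD n 0).toNat : Int) = text.getD n 0 := Int.toNat_of_nonneg hc0
      have hchar : PySem.List.pyGetD text (n : Int) 0 = text.getD n 0 := by
        simp [PySem.List.pyGetD_natCast]
      have hlen : ((List.range bucketSizes.length).map
          (fun c => pvTail bucketSizes c - (pvCnt text typemap n (c : Int) : Int))).length
          = bucketSizes.length := by simp
      have hslot : PySem.List.pyGetD ((List.range bucketSizes.length).map
            (fun c => pvTail bucketSizes c - (pvCnt text typemap n (c : Int) : Int)))
            (text.getD n 0) 0 = pvSlot text bucketSizes typemap n := by
        rw [PySem.List.pyGetD_eq_getElem _ 0 hc0 (by rw [hlen]; exact hcC)]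
        simp only [List.getElem_map, List.getElem_range, pvSlot, hcast]
      simp only [hl, if_true, hchar, hslot]
      rw [Prod.mk.injEq]
      constructor
      · rw [pv_writes_succ]
        simp [hl, pv_apply_append]
      · rw [PySem.List.pySetD_of_nonneg _ _ hc0, pv_set_map_range]
        apply List.map_congr_left
        intro cc hcc
        rw [List.mem_range] at hcc
        by_cases he : cc = (text.getD n 0).toNat
        · subst he
          rw [if_pos rfl, pv_cnt_succ, hcast, hl]
          simp only [Bool.true_and, beq_self_eq_true, if_true]
          unfold pvSlot
          push_cast
          ring
        · rw [if_neg he, pv_cnt_succ]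
          have : (text.getD n 0 == (cc : Int)) = false := by
            simp only [beq_eq_false_iff_ne, ne_eq]
            intro hq
            apply he
            omega
          simp only [this, Bool.and_false]
          simp
    · simp only [hl, if_false, Bool.false_eq_true]
      rw [Prod.mk.injEq]
      constructor
      · rw [pv_writes_succ]; simp [hl]
      · apply List.map_congr_left
        intro cc _
        rw [pv_cnt_succ]
        simp [hl]

theorem pv_lms_bridge2 (typemap : List Int) (n : Nat) (hn : 1 ≤ n) :
    (PySem.List.pyGetD typemap (n : Int) 0 == STYPE &&
      PySem.List.pyGetD typemap ((n : Int) - 1) 0 == LTYPE) = pvLms typemap n := by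
  unfold pvLms STYPE LTYPE
  have h2 : ((n : Nat) : Int) - 1 = ((n - 1 : Nat) : Int) := by omega
  rw [h2]
  simp only [PySem.List.pyGetD_natCast, List.getD]
  have : decide (0 < n) = true := by simp; omega
  rw [this]
  simp

theorem pv_B1_loop (text bucketSizes typemap : List Int)
    (hP : ∀ i ∈ pvPos text typemap,
      0 ≤ text.getD i 0 ∧ text.getD i 0 < (bucketSizes.length : Int)) :
    ∀ n, n ≤ text.length →
      (PySem.List.pyRange 1 (n : Int) 1).foldl (pvStepB1 text typemap)
          (List.replicate bucketSizes.length []) =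
        (List.range bucketSizes.length).map
          (fun (c : Nat) => (((List.range n).filter (pvLms typemap)).filter
              (fun (j : Nat) => text.getD j 0 == (c : Int))).map (fun (j : Nat) => (j : Int))) := by
  intro n
  induction n with
  | zero =>
    intro _
    rw [show ((0 : Nat) : Int) = 0 from rfl, PySem.List.pyRange_one_eq_nil (by omega)]
    simp [List.map_const']
  | succ n ih =>
    intro hn
    rcases Nat.eq_zero_or_pos n with h0 | h1
    · subst h0
      rw [show ((1 : Nat) : Int) = 1 from rfl, PySem.List.pyRange_one_eq_nil (by omega)]
      have : (List.range 1).filter (pvLms typemap) = [] := by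
        simp [List.range_succ, pvLms]
      rw [this]
      simp [List.map_const']
    · have hn' : n ≤ text.length := by omega
      have hsplit : PySem.List.pyRange 1 ((n + 1 : Nat) : Int) 1
          = PySem.List.pyRange 1 (n : Int) 1 ++ [(n : Int)] := by
        rw [show ((n + 1 : Nat) : Int) = (n : Int) + 1 from by push_cast; ring,
          PySem.List.pyRange_one_succ_right (by omega)]
      rw [hsplit, List.foldl_append, ih hn']
      simp only [List.foldl_cons, List.foldl_nil]
      unfold pvStepB1
      rw [pv_lms_bridge2 typemap n h1]
      by_cases hl : pvLms typemap n
      · have hmem : n ∈ pvPos text typemap := by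
          unfold pvPos
          rw [List.mem_filter, List.mem_range]
          exact ⟨by omega, hl⟩
        obtain ⟨hc0, hcC⟩ := hP n hmem
        have htn : (text.getD n 0).toNat < bucketSizes.length := by omega
        have hcast : ((text.getD n 0).toNat : Int) = text.getD n 0 := Int.toNat_of_nonneg hc0
        have hchar : PySem.List.pyGetD text (n : Int) 0 = text.getD n 0 := by
          simp [PySem.List.pyGetD_natCast]
        set G := fun (c : Nat) => (((List.range n).filter (pvLms typemap)).filter
            (fun (j : Nat) => text.getD j 0 == (c : Int))).map (fun (j : Nat) => (j : Int)) with hG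
        have hlen : ((List.range bucketSizes.length).map G).length = bucketSizes.length := by simp
        have hget : PySem.List.pyGetD ((List.range bucketSizes.length).map G) (text.getD n 0) []
            = G (text.getD n 0).toNat := by
          rw [PySem.List.pyGetD_eq_getElem _ [] hc0 (by rw [hlen]; exact hcC)]
          simp only [List.getElem_map, List.getElem_range]
        simp only [hl, if_true, hchar, hget]
        rw [PySem.List.pySetD_of_nonneg _ _ hc0, pv_set_map_range]
        apply List.map_congr_left
        intro cc hcc
        rw [List.mem_range] at hcc
        rw [List.range_succ, List.filter_append, List.filter_append, List.map_append]
        by_cases he : cc = (text.getD n 0).toNat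
        · subst he
          rw [if_pos rfl, hG]
          simp only [List.filter_cons, List.filter_nil, hl, hcast]
          simp
        · rw [if_neg he, hG]
          have hne : (text.getD n 0 == (cc : Int)) = false := by
            simp only [beq_eq_false_iff_ne, ne_eq]
            intro hq; apply he; omega
          simp only [List.filter_cons, List.filter_nil, hl]
          simp
          simpa using hne
      · simp only [hl, if_false, Bool.false_eq_true]
        apply List.map_congr_left
        intro cc _
        rw [List.range_succ, List.filter_append]
        simp [hl]

def pvWB (g : Nat → List Int) : List Int → Nat → Int → List (Int × Int)
  | [], _, _ => []
  | s :: bs, c0, acc =>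
      ((PySem.List.enumerate (g c0)).map (fun kp => (acc + s - kp.1, kp.2))) ++ pvWB g bs (c0 + 1) (acc + s)

theorem pv_apply_append2 (g : List Int) (ws ws' : List (Int × Int)) :
    pvApply g (ws ++ ws') = pvApply (pvApply g ws) ws' := by
  simp [pvApply]

theorem pv_B2_loop (g : Nat → List Int) :
    ∀ (bs : List Int) (c0 : Nat) (acc : Int) (out : List Int),
      ((bs.zip ((List.range' c0 bs.length).map g)).foldl pvStepB2 (acc, out)).2 =
        pvApply out (pvWB g bs c0 acc) := by
  intro bs
  induction bs with
  | nil => intro c0 acc out; simp [pvWB, pvApply]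
  | cons s bs ih =>
    intro c0 acc out
    simp only [List.length_cons, List.range'_succ, List.map_cons, List.zip_cons_cons,
      List.foldl_cons]
    rw [pvWB, pv_apply_append2, ← ih (c0 + 1) (acc + s)]
    show ((bs.zip ((List.range' (c0+1) bs.length).map g)).foldl pvStepB2
      (pvStepB2 (acc, out) (s, g c0))).2 = _
    congr 1
    unfold pvStepB2 pvApply
    simp [List.foldl_map]

theorem pv_WB_flat (g : Nat → List Int) :
    ∀ (bs : List Int) (c0 : Nat) (acc : Int),
      pvWB g bs c0 acc =
        (List.range bs.length).flatMap (fun k =>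
          (PySem.List.enumerate (g (c0 + k))).map
            (fun kp => (acc + (bs.take (k + 1)).sum - kp.1, kp.2))) := by
  intro bs
  induction bs with
  | nil => intro c0 acc; simp [pvWB]
  | cons s bs ih =>
    intro c0 acc
    rw [pvWB, ih (c0 + 1) (acc + s)]
    rw [List.length_cons, List.range_succ_eq_map, List.flatMap_cons, List.flatMap_map]
    congr 1
    · simp
    · rw [show (fun k => (PySem.List.enumerate (g (c0 + 1 + k))).map
            (fun kp => (acc + s + (bs.take (k + 1)).sum - kp.1, kp.2)))
          = (fun k => (PySem.List.enumerate (g (c0 + (k + 1)))).map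
            (fun kp => (acc + ((s :: bs).take (k + 1 + 1)).sum - kp.1, kp.2))) from ?_]
      funext k
      have e1 : c0 + 1 + k = c0 + (k + 1) := by omega
      rw [e1]
      apply List.map_congr_left
      intro kp _
      simp only [List.take_succ_cons, List.sum_cons, Prod.mk.injEq]
      exact ⟨by ring, trivial⟩

theorem pv_sorted_countP_lt (l : List Nat) (hl : l.Pairwise (· < ·)) :
    ∀ k (h : k < l.length), l.countP (fun j => decide (j < l[k])) = k := by
  induction l with
  | nil => intro k h; simp at h
  | cons x l ih =>
    intro k h
    rcases List.pairwise_cons.mp hl with ⟨hx, hl'⟩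
    cases k with
    | zero =>
      simp only [List.getElem_cons_zero, List.countP_cons]
      rw [List.countP_eq_zero.mpr, if_neg (by simp)]
      intro j hj
      simp only [decide_eq_true_eq]
      exact fun hlt => absurd (hx j hj) (by omega)
    | succ k =>
      have hk : k < l.length := by simpa using h
      have hmem : l[k] ∈ l := List.getElem_mem hk
      have e := ih hl' k hk
      simp only [List.getElem_cons_succ, List.countP_cons]
      rw [if_pos (by simpa using hx _ hmem)]
      exact congrArg (· + 1) e
  -- done

theorem pv_cnt_rank (text typemap : List Int) (p : Nat) (hp : p < text.length) (c : Int) :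
    pvCnt text typemap p c
      = ((pvPos text typemap).filter (fun j => text.getD j 0 == c)).countP
          (fun j => decide (j < p)) := by
  unfold pvCnt pvPos
  rw [List.countP_filter, List.countP_filter, List.countP_filter]
  have hsplit : List.range text.length
      = List.range p ++ (List.range (text.length - p)).map (fun x => p + x) := by
    rw [← List.range_add]
    congr 1
    omega
  rw [hsplit, List.countP_append]
  have h2 : ((List.range (text.length - p)).map (fun x => p + x)).countP
      (fun a => (decide (a < p) && (text.getD a 0 == c)) && pvLms typemap a) = 0 := by
    rw [List.countP_eq_zero]
    intro j hj
    rw [List.mem_map] at hj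
    obtain ⟨x, _, rfl⟩ := hj
    simp
  rw [h2, Nat.add_zero]
  apply List.countP_congr
  intro j hj
  rw [List.mem_range] at hj
  simp [hj]

theorem pv_bucket_mem (text typemap : List Int) (c : Nat) (x : Nat)
    (hx : x ∈ pvBucket text typemap c) :
    x < text.length ∧ text.getD x 0 = (c : Int) := by
  unfold pvBucket pvPos at hx
  have h1 := List.mem_of_mem_filter hx
  have h2 := List.of_mem_filter hx
  refine ⟨List.mem_range.mp (List.mem_of_mem_filter h1), by simpa using h2⟩

theorem pv_bucket_sorted (text typemap : List Int) (c : Nat) :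
    (pvBucket text typemap c).Pairwise (· < ·) :=
  (List.pairwise_lt_range.filter _).filter _

theorem pv_bucket_writes (text bucketSizes typemap : List Int) (c : Nat) :
    (PySem.List.enumerate ((pvBucket text typemap c).map (fun (j : Nat) => (j : Int)))).map
        (fun kp => (pvTail bucketSizes c - kp.1, kp.2)) =
      (pvBucket text typemap c).map
        (fun i => (pvSlot text bucketSizes typemap i, (i : Int))) := by
  apply List.ext_getElem
  · rw [List.length_map, PySem.List.length_enumerate, List.length_map, List.length_map]
  · intro k h1 h2
    rw [List.length_map, PySem.List.length_enumerate, List.length_map] at h1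
    rw [List.length_map] at h2
    set B := pvBucket text typemap c with hB
    have hmem : B[k] ∈ B := List.getElem_mem h1
    obtain ⟨hplen, hgd⟩ := pv_bucket_mem text typemap c B[k] hmem
    rw [List.getElem_map, PySem.List.getElem_enumerate, List.getElem_map]
    rw [List.getElem_map]
    rw [Prod.mk.injEq]
    constructor
    · -- pvTail c - (0 + k) = pvSlot B[k]
      unfold pvSlot
      rw [hgd]
      have htn : ((c : Int)).toNat = c := by simp
      rw [htn]
      have hcnt : pvCnt text typemap B[k] (c : Int) = k := by
        rw [pv_cnt_rank text typemap B[k] hplen]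
        have : (pvPos text typemap).filter (fun j => text.getD j 0 == (c : Int)) = B := rfl
        rw [this]
        exact pv_sorted_countP_lt B (pv_bucket_sorted text typemap c) k h1
      rw [hcnt]
      ring
    · rfl

theorem pv_partition_perm (C : Nat) :
    ∀ (l : List Nat) (key : Nat → Nat), (∀ x ∈ l, key x < C) →
      ((List.range C).flatMap (fun c => l.filter (fun x => key x == c))).Perm l := by
  induction C with
  | zero =>
    intro l key h
    have : l = [] := List.eq_nil_iff_forall_not_mem.mpr (fun x hx => by
      have := h x hx; omega)
    subst this
    simp
  | succ C ih =>
    intro l key h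
    rw [List.range_succ, List.flatMap_append]
    have hC : (List.flatMap (fun c => l.filter (fun x => key x == c)) [C])
        = l.filter (fun x => !decide (key x < C)) := by
      simp only [List.flatMap_cons, List.flatMap_nil, List.append_nil]
      apply List.filter_congr
      intro x hx
      have := h x hx
      by_cases he : key x = C
      · simp [he]
      · have : key x < C := by omega
        simp [he, this]
    have h1 : (List.range C).flatMap (fun c => l.filter (fun x => key x == c))
        = (List.range C).flatMap (fun c =>
            (l.filter (fun x => decide (key x < C))).filter (fun x => key x == c)) := by
      rw [List.flatMap_def, List.flatMap_def]
      congr 1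
      apply List.map_congr_left
      intro c hc
      rw [List.mem_range] at hc
      rw [List.filter_filter]
      apply List.filter_congr
      intro x hx
      by_cases he : key x = c
      · simp [he, hc]
      · simp [he]
    rw [hC, h1]
    have h2 := ih (l.filter (fun x => decide (key x < C))) key (by
      intro x hx
      have := List.of_mem_filter hx
      simpa using this)
    exact (h2.append_right _).trans (List.filter_append_perm _ l)

theorem pv_B2_loop' (g : Nat → List Int) (bs : List Int) (acc : Int) (out : List Int) :
    ((bs.zip ((List.range bs.length).map g)).foldl pvStepB2 (acc, out)).2 =
      pvApply out (pvWB g bs 0 acc) := by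
  rw [List.range_eq_range']
  exact pv_B2_loop g bs 0 acc out

theorem pv_apply_set_form (ws : List (Int × Int)) :
    ∀ (g : List Int), (∀ w ∈ ws, 0 ≤ w.1) →
      pvApply g ws = ws.foldl (fun g w => g.set w.1.toNat w.2) g := by
  induction ws with
  | nil => intro g _; rfl
  | cons w ws ih =>
    intro g h
    simp only [pvApply, List.foldl_cons]
    rw [PySem.List.pySetD_of_nonneg _ _ (h w (by simp))]
    exact ih _ (fun w' hw => h w' (by simp [hw]))

theorem pv_apply_perm (text bucketSizes typemap : List Int)
    (hPre : Pre_guess_lms_sort text bucketSizes typemap)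
    (ws : List (Int × Int))
    (hperm : ws.Perm (pvWrites text bucketSizes typemap text.length))
    (g : List Int) :
    pvApply g ws = pvApply g (pvWrites text bucketSizes typemap text.length) := by
  obtain ⟨hT, hB, hPair⟩ := hPre
  have hmemW : ∀ w ∈ pvWrites text bucketSizes typemap text.length, 0 ≤ w.1 := by
    intro w hw
    rw [pvWrites, List.mem_map] at hw
    obtain ⟨i, hi, rfl⟩ := hw
    have h1 := (hB i hi).2.2.1
    omega
  have hmemws : ∀ w ∈ ws, 0 ≤ w.1 := fun w hw => hmemW w (hperm.subset hw)
  rw [pv_apply_set_form ws g hmemws, pv_apply_set_form _ g hmemW]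
  apply List.Perm.foldl_eq' hperm
  intro x hx y hy z
  by_cases hxy : x = y
  · subst hxy; rfl
  · obtain ⟨i, hi, rfl⟩ := List.mem_map.mp (hperm.subset hx)
    obtain ⟨j, hj, rfl⟩ := List.mem_map.mp (hperm.subset hy)
    have hij : i ≠ j := fun hh => hxy (by rw [hh])
    have hslot : pvSlot text bucketSizes typemap i ≠ pvSlot text bucketSizes typemap j := by
      have hp : (pvPos text typemap).Pairwise
          (fun a b => pvSlot text bucketSizes typemap a ≠ pvSlot text bucketSizes typemap b) :=
        List.pairwise_map.mp hPair
      exact hp.forall (fun a b hab => Ne.symm hab) hi hj hij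
    have h1 := (hB i hi).2.2.1
    have h2 := (hB j hj).2.2.1
    have hne : (pvSlot text bucketSizes typemap i).toNat ≠ (pvSlot text bucketSizes typemap j).toNat := by
      omega
    exact List.set_comm _ _ hne

theorem guess_lms_sort_spec0 (text bucketSizes typemap : List Int)
    (hPre : Pre_guess_lms_sort text bucketSizes typemap) :
    guess_lms_sort text bucketSizes typemap = guess_lms_sort_alt text bucketSizes typemap := by
  obtain ⟨hT, hB, hPair⟩ := hPre
  have hP : ∀ i ∈ pvPos text typemap,
      0 ≤ text.getD i 0 ∧ text.getD i 0 < (bucketSizes.length : Int) :=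
    fun i hi => ⟨(hB i hi).1, (hB i hi).2.1⟩
  unfold guess_lms_sort guess_lms_sort_alt
  dsimp only
  rw [pv_A_loop text bucketSizes typemap hP text.length (le_refl _),
      pv_B1_loop text bucketSizes typemap hP text.length (le_refl _),
      pv_B2_loop']
  congr 1
  symm
  apply pv_apply_perm text bucketSizes typemap ⟨hT, hB, hPair⟩
  rw [pv_WB_flat]
  have hflat : (List.range bucketSizes.length).flatMap (fun k =>
      (PySem.List.enumerate ((fun (c : Nat) => (((List.range text.length).filter (pvLms typemap)).filter
              (fun (j : Nat) => text.getD j 0 == (c : Int))).map (fun (j : Nat) => (j : Int))) (0 + k))).map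
        (fun kp => ((0 : Int) + (bucketSizes.take (k + 1)).sum - kp.1, kp.2)))
      = (List.range bucketSizes.length).flatMap (fun c =>
          (pvBucket text typemap c).map
            (fun i => (pvSlot text bucketSizes typemap i, (i : Int)))) := by
    rw [List.flatMap_def, List.flatMap_def]
    congr 1
    apply List.map_congr_left
    intro c _
    have e1 : (fun (kp : Int × Int) => ((0 : Int) + (bucketSizes.take (c + 1)).sum - kp.1, kp.2))
        = (fun (kp : Int × Int) => (pvTail bucketSizes c - kp.1, kp.2)) := by
      funext kp
      simp [pvTail]
    rw [Nat.zero_add, e1]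
    exact pv_bucket_writes text bucketSizes typemap c
  rw [hflat]
  have hkey : ∀ x ∈ pvPos text typemap, (text.getD x 0).toNat < bucketSizes.length := by
    intro x hx
    have h1 := (hB x hx).1
    have h2 := (hB x hx).2.1
    omega
  have hperm0 := pv_partition_perm bucketSizes.length (pvPos text typemap)
    (fun x => (text.getD x 0).toNat) hkey
  have hbuckets : (List.range bucketSizes.length).flatMap (fun c =>
      (pvBucket text typemap c).map (fun i => (pvSlot text bucketSizes typemap i, (i : Int))))
      = ((List.range bucketSizes.length).flatMap (fun c =>
          (pvPos text typemap).filter (fun x => (text.getD x 0).toNat == c))).map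
          (fun i => (pvSlot text bucketSizes typemap i, (i : Int))) := by
    rw [List.map_flatMap, List.flatMap_def, List.flatMap_def]
    congr 1
    apply List.map_congr_left
    intro c _
    congr 1
    unfold pvBucket
    apply List.filter_congr
    intro x hx
    have h0 := (hB x hx).1
    simp only [List.getD] at h0
    rw [Bool.eq_iff_iff]
    simp
    omega
  rw [hbuckets]
  exact hperm0.map _

-- ===== VERDICT (by name: the statement is the Claim_ definition above) =====
theorem guess_lms_sort_spec : Claim_equal_guess_lms_sort := by
  intro text bucketSizes typemap _ hPre
  exact guess_lms_sort_spec0 text bucketSizes typemap hPre
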